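-- pv_equiv track=rewrite | github.com/KimGeunUk/Algorithm-Study | Level1_2022/음양 더하기.py | solution
-- ===== SOURCE A (Python) =====
-- def solution(absolutes, signs):
--     answer = 0
--
--     for i, j in zip(absolutes, signs):
--         if j == True:
--             i = +i
--         else:
--             i = -i
--         answer += i
--
--     return answer
-- ===== SOURCE B (Python) =====
-- def solution(absolutes, signs):
--     total = sum(a for a, s in zip(absolutes, signs))
--     return total - 2 * sum(a for a, s in zip(absolutes, signs) if s != True)
-- ===== Notes on version B (the rewrite author's own statement) =====
-- stated objective: alternative
-- what changed: B computes the plain total of the zipped absolutes and subtracts twice the sum of the negatively-signed ones, instead of A's single pass with a per-element conditional negation.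
import Mathlib
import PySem

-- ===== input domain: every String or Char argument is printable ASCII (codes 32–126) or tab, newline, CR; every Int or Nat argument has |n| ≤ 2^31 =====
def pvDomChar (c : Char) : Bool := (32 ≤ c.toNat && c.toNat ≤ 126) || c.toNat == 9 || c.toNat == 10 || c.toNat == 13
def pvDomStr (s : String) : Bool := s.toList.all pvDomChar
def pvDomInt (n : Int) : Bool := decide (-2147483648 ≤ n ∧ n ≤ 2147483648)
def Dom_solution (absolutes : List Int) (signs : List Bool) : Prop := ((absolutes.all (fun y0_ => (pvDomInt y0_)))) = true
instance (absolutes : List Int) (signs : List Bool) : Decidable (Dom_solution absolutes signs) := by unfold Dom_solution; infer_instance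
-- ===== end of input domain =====

-- B replaces A's per-element conditional accumulation by "total of zipped absolutes minus twice the negatively-signed sum" (alternative decomposition, same cost).

-- ===== PORT A =====
def solution (absolutes : List Int) (signs : List Bool) : Int :=
  (List.zip absolutes signs).foldl
    (fun answer p => answer + (if p.2 == true then p.1 else -p.1)) 0

-- ===== PORT B =====
def solution_alt (absolutes : List Int) (signs : List Bool) : Int :=
  let total := ((List.zip absolutes signs).map (fun p => p.1)).sum
  total - 2 * (((List.zip absolutes signs).filter (fun p => p.2 != true)).map (fun p => p.1)).sum

-- ===== PRECONDITION & SPEC =====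
def Spec_solution (absolutes : List Int) (signs : List Bool) (out : Int) : Prop := out = solution_alt absolutes signs
instance (absolutes : List Int) (signs : List Bool) (out : Int) : Decidable (Spec_solution absolutes signs out) := by unfold Spec_solution; infer_instance

-- ===== CLAIM (what is proved, stated in full; the proofs are below) =====
def Claim_equal_solution : Prop := ∀ (absolutes : List Int) (signs : List Bool), Dom_solution absolutes signs → Spec_solution absolutes signs (solution absolutes signs)

-- ===== LEMMAS AND PROOFS =====
theorem pv_fold_eq (l : List (Int × Bool)) (init : Int) :
    l.foldl (fun answer p => answer + (if p.2 == true then p.1 else -p.1)) init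
      = init + (l.map (fun p => p.1)).sum
          - 2 * ((l.filter (fun p => p.2 != true)).map (fun p => p.1)).sum := by
  induction l generalizing init with
  | nil => simp
  | cons h t ih =>
    simp only [List.foldl_cons, List.map_cons, List.sum_cons, List.filter_cons]
    rw [ih]
    cases h.2 <;> simp <;> ring

-- ===== VERDICT (by name: the statement is the Claim_ definition above) =====
theorem solution_spec : Claim_equal_solution := by
  intro absolutes signs _
  unfold Spec_solution solution solution_alt
  rw [pv_fold_eq]
  simp
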